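-- pv_equiv track=rewrite | github.com/Ruchin-Audichya/StudentPilot | backend/main.py | _normalize_role_tokens
-- ===== SOURCE A (Python) =====
-- def _normalize_role_tokens(roles):
--     tokens = set()
--     for r in (roles or []):
--         rl = str(r).lower()
--         if any(k in rl for k in ("software","sde","developer","engineering","engineer","programmer","backend","frontend","fullstack")):
--             tokens.add("software")
--         if any(k in rl for k in ("data","analyst","analytics","bi","business intelligence","ds","scientist")):
--             tokens.add("data")
--         if any(k in rl for k in ("ml","machine learning","ai","deep")):
--             tokens.add("ml")
--         if any(k in rl for k in ("web","frontend","react","javascript","typescript","ui","ux")):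
--             tokens.add("web")
--         if any(k in rl for k in ("cloud","devops","aws","azure","gcp","kubernetes","docker")):
--             tokens.add("cloud")
--         if any(k in rl for k in ("design","designer","ui","ux")):
--             tokens.add("design")
--     return tokens
-- ===== SOURCE B (Python) =====
-- # Anchored multi-pattern scan: each role is lowercased once and walked suffix by
-- # suffix; at every position all keywords are matched as PREFIXES of the current
-- # suffix (naive multi-pattern matching over one keyword->categories table),
-- # instead of A's six independent per-category substring ("k in rl") searches.
-- # Matched categories are emitted in a fixed canonical order per role.
--
-- _KEYWORD_INDEX = (
--     ("software", ("software",)), ("sde", ("software",)), ("developer", ("software",)),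
--     ("engineering", ("software",)), ("engineer", ("software",)), ("programmer", ("software",)),
--     ("backend", ("software",)), ("web", ("web",)), ("frontend", ("software", "web")),
--     ("fullstack", ("software",)), ("react", ("web",)), ("javascript", ("web",)),
--     ("typescript", ("web",)), ("data", ("data",)), ("analyst", ("data",)),
--     ("analytics", ("data",)), ("bi", ("data",)), ("business intelligence", ("data",)),
--     ("ds", ("data",)), ("scientist", ("data",)),
--     ("ml", ("ml",)), ("machine learning", ("ml",)), ("ai", ("ml",)), ("deep", ("ml",)),
--     ("cloud", ("cloud",)), ("devops", ("cloud",)), ("aws", ("cloud",)), ("azure", ("cloud",)),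
--     ("gcp", ("cloud",)), ("kubernetes", ("cloud",)), ("docker", ("cloud",)),
--     ("design", ("design",)), ("designer", ("design",)), ("ui", ("web", "design")),
--     ("ux", ("web", "design")),
-- )
-- _CATEGORY_ORDER = ("software", "data", "ml", "web", "cloud", "design")
--
-- def _scan(suffix, hits):
--     """Match every keyword as a prefix of each successive suffix of the text."""
--     while suffix:
--         for k, cats in _KEYWORD_INDEX:
--             if suffix.startswith(k):
--                 hits.update(cats)
--         suffix = suffix[1:]
--     return hits
--
-- def _normalize_role_tokens(roles):
--     tokens = set()
--     for r in (roles or []):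
--         hits = _scan(str(r).lower(), set())
--         for c in _CATEGORY_ORDER:
--             if c in hits:
--                 tokens.add(c)
--     return tokens
-- ===== Notes on version B (the rewrite author's own statement) =====
-- stated objective: alternative
-- what changed: Replaces A's six per-category any('k in rl') substring searches with a naive multi-pattern matcher: each role is walked suffix by suffix once and all keywords of one keyword->categories table are matched as prefixes at each position, matched categories then emitted in a fixed canonical order.
import Mathlib
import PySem

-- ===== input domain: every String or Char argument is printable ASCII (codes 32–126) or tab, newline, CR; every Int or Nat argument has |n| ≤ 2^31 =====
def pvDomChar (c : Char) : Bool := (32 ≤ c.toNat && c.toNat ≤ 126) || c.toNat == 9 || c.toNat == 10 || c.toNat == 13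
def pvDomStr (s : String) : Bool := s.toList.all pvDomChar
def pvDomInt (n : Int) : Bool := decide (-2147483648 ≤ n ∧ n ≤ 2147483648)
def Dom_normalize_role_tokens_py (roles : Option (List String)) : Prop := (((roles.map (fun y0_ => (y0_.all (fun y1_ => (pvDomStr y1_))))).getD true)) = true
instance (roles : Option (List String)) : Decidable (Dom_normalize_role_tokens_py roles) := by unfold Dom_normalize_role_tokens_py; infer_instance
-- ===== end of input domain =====

-- B replaces A's six per-category substring ("k in rl") scans with an anchored
-- multi-pattern scan: one walk over each role's suffixes, matching all keywords of a
-- keyword→categories table as prefixes at each position (objective: alternative; same cost).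

-- ===== PORT A =====
def normalize_role_tokens_py (roles : Option (List String)) : List String :=
  (match roles with | none => [] | some rs => rs).foldl (fun tokens r =>
    let rl := PySem.Str.lower r
    let tokens := if (["software","sde","developer","engineering","engineer","programmer","backend","frontend","fullstack"] : List String).any (fun k => PySem.Str.isIn k rl) then PySem.Set.add tokens "software" else tokens
    let tokens := if (["data","analyst","analytics","bi","business intelligence","ds","scientist"] : List String).any (fun k => PySem.Str.isIn k rl) then PySem.Set.add tokens "data" else tokens
    let tokens := if (["ml","machine learning","ai","deep"] : List String).any (fun k => PySem.Str.isIn k rl) then PySem.Set.add tokens "ml" else tokens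
    let tokens := if (["web","frontend","react","javascript","typescript","ui","ux"] : List String).any (fun k => PySem.Str.isIn k rl) then PySem.Set.add tokens "web" else tokens
    let tokens := if (["cloud","devops","aws","azure","gcp","kubernetes","docker"] : List String).any (fun k => PySem.Str.isIn k rl) then PySem.Set.add tokens "cloud" else tokens
    let tokens := if (["design","designer","ui","ux"] : List String).any (fun k => PySem.Str.isIn k rl) then PySem.Set.add tokens "design" else tokens
    tokens) PySem.Set.empty

-- ===== PORT B =====
-- the keyword→categories table (order of Source B's _KEYWORD_INDEX tuple)
def pvKeywordIndex : List (String × List String) :=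
  [("software", ["software"]), ("sde", ["software"]), ("developer", ["software"]),
   ("engineering", ["software"]), ("engineer", ["software"]), ("programmer", ["software"]),
   ("backend", ["software"]), ("web", ["web"]), ("frontend", ["software", "web"]),
   ("fullstack", ["software"]), ("react", ["web"]), ("javascript", ["web"]), ("typescript", ["web"]),
   ("data", ["data"]), ("analyst", ["data"]), ("analytics", ["data"]), ("bi", ["data"]),
   ("business intelligence", ["data"]), ("ds", ["data"]), ("scientist", ["data"]),
   ("ml", ["ml"]), ("machine learning", ["ml"]), ("ai", ["ml"]), ("deep", ["ml"]),
   ("cloud", ["cloud"]), ("devops", ["cloud"]), ("aws", ["cloud"]), ("azure", ["cloud"]),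
   ("gcp", ["cloud"]), ("kubernetes", ["cloud"]), ("docker", ["cloud"]),
   ("design", ["design"]), ("designer", ["design"]), ("ui", ["web", "design"]), ("ux", ["web", "design"])]

def pvCategoryOrder : List String := ["software", "data", "ml", "web", "cloud", "design"]

-- Source B's _scan: while suffix: match every keyword as a prefix of the current suffix;
-- strings are carried as List Char (the PySem convention), suffix[1:] is the tail.
def pvScan : List Char → PySem.Set String → PySem.Set String
  | [], hits => hits
  | c :: rest, hits =>
      pvScan rest
        (pvKeywordIndex.foldl
          (fun h kc => if PySem.Chars.startswith (c :: rest) kc.1.toList then PySem.Set.update h kc.2 else h)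
          hits)

def normalize_role_tokens_py_alt (roles : Option (List String)) : List String :=
  (match roles with | none => [] | some rs => rs).foldl (fun tokens r =>
    let hits := pvScan (PySem.Str.lower r).toList PySem.Set.empty
    pvCategoryOrder.foldl (fun t c => if PySem.Set.contains hits c then PySem.Set.add t c else t) tokens)
    PySem.Set.empty

-- ===== PRECONDITION & SPEC =====
def Spec_normalize_role_tokens_py (roles : Option (List String)) (out : List String) : Prop := out = normalize_role_tokens_py_alt roles
instance (roles : Option (List String)) (out : List String) : Decidable (Spec_normalize_role_tokens_py roles out) := by unfold Spec_normalize_role_tokens_py; infer_instance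

-- ===== CLAIM (what is proved, stated in full; the proofs are below) =====
def Claim_equal_normalize_role_tokens_py : Prop := ∀ (roles : Option (List String)), Dom_normalize_role_tokens_py roles → Spec_normalize_role_tokens_py roles (normalize_role_tokens_py roles)

-- ===== LEMMAS AND PROOFS =====

theorem pv_contains_update (m : List String) (l : List String) (c : String) :
    PySem.Set.contains (PySem.Set.update m l) c = (PySem.Set.contains m c || l.contains c) := by
  apply Bool.coe_iff_coe.mp
  simp only [Bool.or_eq_true, PySem.Set.contains_iff, PySem.Set.mem_update, List.contains_iff_mem]

-- membership after one pass over the keyword table gated by any Bool condition p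
theorem pv_contains_tableFold (p : String × List String → Bool) (c : String) :
    ∀ (entries : List (String × List String)) (m : List String),
      PySem.Set.contains
        (entries.foldl (fun (h : PySem.Set String) kc => if p kc then PySem.Set.update h kc.2 else h) m) c
      = (PySem.Set.contains m c || entries.any (fun kc => p kc && kc.2.contains c)) := by
  intro entries
  induction entries with
  | nil => intro m; simp
  | cons kc rest ih =>
      intro m
      simp only [List.foldl_cons, List.any_cons]
      rw [ih]
      by_cases h : p kc = true
      · rw [if_pos h, pv_contains_update, h, Bool.true_and, Bool.or_assoc]
      · rw [if_neg h, Bool.eq_false_iff.mpr h, Bool.false_and, Bool.false_or]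

-- 'sub in s' decomposes over a cons as prefix-here or in-tail
theorem pv_isIn_cons (sub : List Char) (a : Char) (l : List Char) :
    PySem.Chars.isIn sub (a :: l)
      = (PySem.Chars.startswith (a :: l) sub || PySem.Chars.isIn sub l) := by
  apply Bool.coe_iff_coe.mp
  simp only [Bool.or_eq_true, PySem.Chars.isIn_iff_infix, PySem.Chars.startswith_iff]
  exact List.infix_cons_iff

theorem pv_any_or {α : Type} (l : List α) (f g : α → Bool) :
    (l.any f || l.any g) = l.any (fun x => f x || g x) := by
  induction l with
  | nil => rfl
  | cons x xs ih =>
      simp only [List.any_cons, ← ih]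
      cases f x <;> cases g x <;> simp

theorem pv_isIn_nil : ∀ kc ∈ pvKeywordIndex, PySem.Chars.isIn kc.1.toList [] = false := by decide

-- what Source B's anchored scan collects: exactly the categories of the keywords occurring in s
theorem pv_contains_scan (c : String) :
    ∀ (s : List Char) (hits : PySem.Set String),
      PySem.Set.contains (pvScan s hits) c
      = (PySem.Set.contains hits c
          || pvKeywordIndex.any (fun kc => PySem.Chars.isIn kc.1.toList s && kc.2.contains c)) := by
  intro s
  induction s with
  | nil =>
      intro hits
      have h : pvKeywordIndex.any (fun kc => PySem.Chars.isIn kc.1.toList [] && kc.2.contains c) = false := by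
        apply List.any_eq_false.mpr
        intro kc hkc
        rw [pv_isIn_nil kc hkc, Bool.false_and]
        exact Bool.false_ne_true
      rw [pvScan, h, Bool.or_false]
  | cons a rest ih =>
      intro hits
      rw [pvScan, ih, pv_contains_tableFold, Bool.or_assoc, pv_any_or]
      congr 1
      apply List.any_congr rfl
      intro kc
      rw [pv_isIn_cons, Bool.and_or_distrib_right]

-- pushing the category-membership test through the table: only entries whose category
-- list holds c survive, in table order
theorem pv_any_filter (c : String) (q : String → Bool) :
    ∀ (l : List (String × List String)),
      l.any (fun kc => q kc.1 && kc.2.contains c)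
        = ((l.filter (fun kc => kc.2.contains c)).map Prod.fst).any q := by
  intro l
  induction l with
  | nil => rfl
  | cons kc rest ih =>
      by_cases h : kc.2.contains c = true
      · rw [List.any_cons, List.filter_cons, if_pos h, List.map_cons, List.any_cons, h,
          Bool.and_true, ih]
      · have h' : kc.2.contains c = false := Bool.eq_false_iff.mpr h
        rw [List.any_cons, List.filter_cons, if_neg h, h', Bool.and_false, Bool.false_or, ih]

-- the six category columns of the table are exactly A's six keyword lists
theorem pv_cols :
    (pvKeywordIndex.filter (fun kc => kc.2.contains "software")).map Prod.fst
        = ["software","sde","developer","engineering","engineer","programmer","backend","frontend","fullstack"]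
    ∧ (pvKeywordIndex.filter (fun kc => kc.2.contains "data")).map Prod.fst
        = ["data","analyst","analytics","bi","business intelligence","ds","scientist"]
    ∧ (pvKeywordIndex.filter (fun kc => kc.2.contains "ml")).map Prod.fst
        = ["ml","machine learning","ai","deep"]
    ∧ (pvKeywordIndex.filter (fun kc => kc.2.contains "web")).map Prod.fst
        = ["web","frontend","react","javascript","typescript","ui","ux"]
    ∧ (pvKeywordIndex.filter (fun kc => kc.2.contains "cloud")).map Prod.fst
        = ["cloud","devops","aws","azure","gcp","kubernetes","docker"]
    ∧ (pvKeywordIndex.filter (fun kc => kc.2.contains "design")).map Prod.fst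
        = ["design","designer","ui","ux"] := by
  decide

-- per category: B's scan membership equals A's any() test
theorem pv_cat (rl : String) (c : String)
    (hcol : (pvKeywordIndex.filter (fun kc => kc.2.contains c)).map Prod.fst = ks) :
    PySem.Set.contains (pvScan rl.toList PySem.Set.empty) c
      = ks.any (fun k => PySem.Str.isIn k rl) := by
  rw [pv_contains_scan, PySem.Set.empty]
  show (false || _) = _
  rw [Bool.false_or, pv_any_filter c (fun k => PySem.Chars.isIn k.toList rl.toList), hcol]
  apply List.any_congr rfl
  intro k
  simp [PySem.Str.isIn]

-- ===== VERDICT (by name: the statement is the Claim_ definition above) =====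
theorem normalize_role_tokens_py_spec : Claim_equal_normalize_role_tokens_py := by
  intro roles _
  show normalize_role_tokens_py roles = normalize_role_tokens_py_alt roles
  unfold normalize_role_tokens_py normalize_role_tokens_py_alt
  apply PySem.List.foldl_congr_mem
  intro tokens r _
  have hcols := pv_cols
  simp only [pvCategoryOrder, List.foldl_cons, List.foldl_nil]
  rw [pv_cat (PySem.Str.lower r) "software" hcols.1,
      pv_cat (PySem.Str.lower r) "data" hcols.2.1,
      pv_cat (PySem.Str.lower r) "ml" hcols.2.2.1,
      pv_cat (PySem.Str.lower r) "web" hcols.2.2.2.1,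
      pv_cat (PySem.Str.lower r) "cloud" hcols.2.2.2.2.1,
      pv_cat (PySem.Str.lower r) "design" hcols.2.2.2.2.2]
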